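-- pv_equiv track=rewrite | github.com/bhattadeb34/multi-fidelity-proton-affinity | screening/scripts/plotting/plot_si_candidates.py | wrap_smiles_two_lines
-- ===== SOURCE A (Python) =====
-- def wrap_smiles_two_lines(smiles: str, max_len: int = 18) -> str:
--     """Force SMILES onto exactly two lines so xlabel heights stay uniform.
--
--     Short strings get a trailing blank line; long strings are split near a
--     natural separator close to the midpoint, falling back to midpoint split.
--     """
--     if len(smiles) <= max_len:
--         return smiles + "\n "
--     seps = ("_", "-", "(", ")", ".", "/")
--     mid = len(smiles) // 2
--     best = None
--     for i, ch in enumerate(smiles):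
--         if ch in seps and (best is None or abs(i - mid) < abs(best - mid)):
--             best = i
--     if best is not None and 0 < best < len(smiles) - 1:
--         return smiles[:best + 1] + "\n" + smiles[best + 1:]
--     return smiles[:mid] + "\n" + smiles[mid:]
-- ===== SOURCE B (Python) =====
-- SEPS = frozenset("_-()./")
--
--
-- def wrap_smiles_two_lines(smiles: str, max_len: int = 18) -> str:
--     """Two-line SMILES wrap: outward two-sided scan from the midpoint instead of
--     a full argmin pass."""
--     if len(smiles) <= max_len:
--         return smiles + "\n "
--     n = len(smiles)
--     mid = n // 2
--     head, tail = smiles[:mid + 1], smiles[mid + 1:]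
--     left = next((i for i in range(len(head) - 1, -1, -1) if head[i] in SEPS), None)
--     right = next((j for j, ch in enumerate(tail, mid + 1) if ch in SEPS), None)
--     if left is None:
--         best = right
--     elif right is None or mid - left <= right - mid:
--         best = left
--     else:
--         best = right
--     if best is not None and 0 < best < n - 1:
--         return smiles[:best + 1] + "\n" + smiles[best + 1:]
--     return smiles[:mid] + "\n" + smiles[mid:]
-- ===== Notes on version B (the rewrite author's own statement) =====
-- stated objective: alternative
-- what changed: Replaces the full-string argmin scan over all separator positions with a two-sided nearest-separator search (last separator in the left half found by a backward scan, first separator in the right half by a forward scan, then one distance comparison with left winning ties).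
import Mathlib
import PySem

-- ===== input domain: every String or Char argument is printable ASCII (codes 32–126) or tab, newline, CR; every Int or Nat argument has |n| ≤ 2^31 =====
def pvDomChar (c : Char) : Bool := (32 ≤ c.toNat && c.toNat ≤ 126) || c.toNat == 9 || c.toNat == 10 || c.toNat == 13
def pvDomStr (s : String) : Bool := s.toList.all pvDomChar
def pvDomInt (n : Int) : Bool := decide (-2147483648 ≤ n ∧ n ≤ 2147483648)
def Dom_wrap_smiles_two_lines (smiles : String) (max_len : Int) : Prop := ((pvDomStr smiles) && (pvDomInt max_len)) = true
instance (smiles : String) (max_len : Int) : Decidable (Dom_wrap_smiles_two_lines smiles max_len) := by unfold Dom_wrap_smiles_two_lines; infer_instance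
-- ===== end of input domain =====

-- B replaces A's whole-string argmin scan by a two-sided nearest-separator search from the midpoint (objective: alternative decomposition, same cost).

-- ===== PORT A =====
-- the tuple  seps = ("_", "-", "(", ")", ".", "/")
def pvSepsA : List Char := ['_', '-', '(', ')', '.', '/']

-- the 'for i, ch in enumerate(smiles)' argmin loop over 'best'
def pvBestA (s : List Char) (mid : Int) : Option Int :=
  (PySem.List.enumerate s 0).foldl (fun best p =>
    if pvSepsA.contains p.2 &&
        (match best with
         | none => true
         | some b => decide ((p.1 - mid).natAbs < (b - mid).natAbs)) then
      some p.1
    else best) none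

def wrap_smiles_two_lines (smiles : String) (max_len : Int) : String :=
  if PySem.Str.len smiles ≤ max_len then String.ofList (smiles.toList ++ ['\n', ' '])
  else
    let s := smiles.toList
    let mid := PySem.Int.floordiv (PySem.Str.len smiles) 2
    match pvBestA s mid with
    | some b =>
        if 0 < b ∧ b < PySem.Str.len smiles - 1 then
          String.ofList (PySem.List.slice s none (some (b + 1)) ++ '\n' :: PySem.List.slice s (some (b + 1)) none)
        else
          String.ofList (PySem.List.slice s none (some mid) ++ '\n' :: PySem.List.slice s (some mid) none)
    | none => String.ofList (PySem.List.slice s none (some mid) ++ '\n' :: PySem.List.slice s (some mid) none)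

-- ===== PORT B =====
-- SEPS = frozenset("_-()./")
def pvSepsB : PySem.Set Char := PySem.Set.ofList ['_', '-', '(', ')', '.', '/']

-- next((i for i in range(len(head) - 1, -1, -1) if head[i] in SEPS), None)
def pvLeftScan (head : List Char) : Nat → Option Nat
  | 0 => none
  | i + 1 => if PySem.Set.contains pvSepsB (head.getD i ' ') then some i else pvLeftScan head i

-- next((j for j, ch in enumerate(tail, mid + 1) if ch in SEPS), None)  (the mid+1 offset is added by the caller)
def pvRightScan : List Char → Option Nat
  | [] => none
  | c :: rest => if PySem.Set.contains pvSepsB c then some 0 else (pvRightScan rest).map (· + 1)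

-- the left/right combination: nearest separator to mid, left winning ties
def pvBestB (s : List Char) (mid : Nat) : Option Nat :=
  let head := s.take (mid + 1)
  let left := pvLeftScan head head.length
  let right := (pvRightScan (s.drop (mid + 1))).map (fun k => mid + 1 + k)
  match left, right with
  | none, r => r
  | some l, none => some l
  | some l, some r => if mid - l ≤ r - mid then some l else some r

def wrap_smiles_two_lines_alt (smiles : String) (max_len : Int) : String :=
  if PySem.Str.len smiles ≤ max_len then String.ofList (smiles.toList ++ ['\n', ' '])
  else
    let s := smiles.toList
    let n := s.length
    let mid := n / 2
    match pvBestB s mid with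
    | some b =>
        if 0 < b ∧ b < n - 1 then
          String.ofList (s.take (b + 1) ++ '\n' :: s.drop (b + 1))
        else String.ofList (s.take mid ++ '\n' :: s.drop mid)
    | none => String.ofList (s.take mid ++ '\n' :: s.drop mid)

-- ===== PRECONDITION & SPEC =====
def Spec_wrap_smiles_two_lines (smiles : String) (max_len : Int) (out : String) : Prop := out = wrap_smiles_two_lines_alt smiles max_len
instance (smiles : String) (max_len : Int) (out : String) : Decidable (Spec_wrap_smiles_two_lines smiles max_len out) := by unfold Spec_wrap_smiles_two_lines; infer_instance

-- ===== CLAIM (what is proved, stated in full; the proofs are below) =====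
def Claim_equal_wrap_smiles_two_lines : Prop := ∀ (smiles : String) (max_len : Int), Dom_wrap_smiles_two_lines smiles max_len → Spec_wrap_smiles_two_lines smiles max_len (wrap_smiles_two_lines smiles max_len)

-- ===== LEMMAS AND PROOFS =====

-- both programs test membership in the same separator set
theorem sepB_eq_sepA (c : Char) : PySem.Set.contains pvSepsB c = pvSepsA.contains c := by
  have h : (pvSepsB : List Char) = pvSepsA := by decide
  simp [PySem.Set.contains, h]

-- getD bookkeeping for append / take / drop
theorem pvGetD_append_lt (t : List Char) (c : Char) (j : Nat) (h : j < t.length) :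
    (t ++ [c]).getD j ' ' = t.getD j ' ' := by
  simp [List.getD, List.getElem?_append_left h]

theorem pvGetD_append_len (t : List Char) (c : Char) :
    (t ++ [c]).getD t.length ' ' = c := by
  simp [List.getD]

theorem pvGetD_take (s : List Char) (m j : Nat) (h : j < m) :
    (s.take m).getD j ' ' = s.getD j ' ' := by
  simp [List.getD, h]

theorem pvGetD_drop (s : List Char) (k j : Nat) :
    (s.drop k).getD j ' ' = s.getD (k + j) ' ' := by
  simp [List.getD, List.getElem?_drop]

-- "r is the separator index nearest to mid, smaller index on ties" (none = no separator)
def IsBest (s : List Char) (m : Nat) (r : Option Nat) : Prop :=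
  match r with
  | none => ∀ j, j < s.length → pvSepsA.contains (s.getD j ' ') = false
  | some b => b < s.length ∧ pvSepsA.contains (s.getD b ' ') = true ∧
      ∀ j, j < s.length → pvSepsA.contains (s.getD j ' ') = true →
        (((b : Int) - m).natAbs < ((j : Int) - m).natAbs ∨
          (((b : Int) - m).natAbs = ((j : Int) - m).natAbs ∧ b ≤ j))

theorem isBest_unique (s : List Char) (m : Nat) (r₁ r₂ : Option Nat)
    (h₁ : IsBest s m r₁) (h₂ : IsBest s m r₂) : r₁ = r₂ := by
  cases r₁ with
  | none =>
    cases r₂ with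
    | none => rfl
    | some b₂ =>
      obtain ⟨hb, hsep, -⟩ := h₂
      have hcontr := h₁ b₂ hb
      rw [hsep] at hcontr
      exact absurd hcontr (by decide)
  | some b₁ =>
    cases r₂ with
    | none =>
      obtain ⟨hb, hsep, -⟩ := h₁
      have hcontr := h₂ b₁ hb
      rw [hsep] at hcontr
      exact absurd hcontr (by decide)
    | some b₂ =>
      obtain ⟨hb₁, hsep₁, hmin₁⟩ := h₁
      obtain ⟨hb₂, hsep₂, hmin₂⟩ := h₂
      have c₁ := hmin₁ b₂ hb₂ hsep₂
      have c₂ := hmin₂ b₁ hb₁ hsep₁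
      have : b₁ = b₂ := by omega
      simp [this]

theorem bestA_step (t : List Char) (c : Char) (mid : Int) :
    pvBestA (t ++ [c]) mid =
      (if pvSepsA.contains c &&
          (match pvBestA t mid with
           | none => true
           | some b => decide (((t.length : Int) - mid).natAbs < (b - mid).natAbs)) then
        some (t.length : Int)
      else pvBestA t mid) := by
  unfold pvBestA
  rw [PySem.List.enumerate_append, List.foldl_append]
  simp [PySem.List.enumerate_cons, PySem.List.enumerate_nil]

theorem bestA_step_notsep (t : List Char) (c : Char) (mid : Int)
    (hc : pvSepsA.contains c = false) : pvBestA (t ++ [c]) mid = pvBestA t mid := by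
  rw [bestA_step, hc]; simp

theorem bestA_step_none (t : List Char) (c : Char) (mid : Int)
    (hc : pvSepsA.contains c = true) (h : pvBestA t mid = none) :
    pvBestA (t ++ [c]) mid = some (t.length : Int) := by
  rw [bestA_step, h, hc]; simp

theorem bestA_step_better (t : List Char) (c : Char) (mid b : Int)
    (hc : pvSepsA.contains c = true) (h : pvBestA t mid = some b)
    (hlt : ((t.length : Int) - mid).natAbs < (b - mid).natAbs) :
    pvBestA (t ++ [c]) mid = some (t.length : Int) := by
  rw [bestA_step, h, hc]; simp [hlt]

theorem bestA_step_keep (t : List Char) (c : Char) (mid b : Int)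
    (hc : pvSepsA.contains c = true) (h : pvBestA t mid = some b)
    (hge : ¬ ((t.length : Int) - mid).natAbs < (b - mid).natAbs) :
    pvBestA (t ++ [c]) mid = some b := by
  rw [bestA_step, h, hc]; simp [hge]

theorem bestA_isBest (s : List Char) (m : Nat) :
    ∃ r : Option Nat, pvBestA s (m : Int) = Option.map (fun bn : Nat => (bn : Int)) r ∧ IsBest s m r := by
  induction s using List.reverseRecOn with
  | nil =>
    refine ⟨none, by simp [pvBestA, PySem.List.enumerate_nil], ?_⟩
    intro j hj; simp at hj
  | append_singleton t c ih =>
    obtain ⟨r, hr, hbest⟩ := ih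
    have hlen : (t ++ [c]).length = t.length + 1 := by simp
    by_cases hc : pvSepsA.contains c = true
    · cases r with
      | none =>
        simp only [Option.map_none] at hr
        refine ⟨some t.length, by rw [bestA_step_none t c _ hc hr]; rfl, ?_, ?_, ?_⟩
        · omega
        · rw [pvGetD_append_len]; exact hc
        · intro j hj hsep
          rw [hlen] at hj
          rcases Nat.lt_or_ge j t.length with h | h
          · rw [pvGetD_append_lt t c j h] at hsep
            have hcontr := hbest j h
            rw [hsep] at hcontr
            exact absurd hcontr (by decide)
          · have : j = t.length := by omega
            subst this; omega
      | some b =>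
        simp only [Option.map_some] at hr
        obtain ⟨hb, hsep, hmin⟩ := hbest
        by_cases hlt : ((t.length : Int) - m).natAbs < ((b : Int) - m).natAbs
        · refine ⟨some t.length, by rw [bestA_step_better t c _ _ hc hr hlt]; rfl, by omega,
            by rw [pvGetD_append_len]; exact hc, ?_⟩
          intro j hj hsep'
          rw [hlen] at hj
          rcases Nat.lt_or_ge j t.length with h | h
          · rw [pvGetD_append_lt t c j h] at hsep'
            have := hmin j h hsep'
            omega
          · have : j = t.length := by omega
            subst this; omega
        · refine ⟨some b, by rw [bestA_step_keep t c _ _ hc hr hlt]; rfl, by omega,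
            by rw [pvGetD_append_lt t c b hb]; exact hsep, ?_⟩
          intro j hj hsep'
          rw [hlen] at hj
          rcases Nat.lt_or_ge j t.length with h | h
          · rw [pvGetD_append_lt t c j h] at hsep'
            exact hmin j h hsep'
          · have : j = t.length := by omega
            subst this; omega
    · simp only [Bool.not_eq_true] at hc
      refine ⟨r, by rw [bestA_step_notsep t c _ hc]; exact hr, ?_⟩
      cases r with
      | none =>
        intro j hj
        rw [hlen] at hj
        rcases Nat.lt_or_ge j t.length with h | h
        · rw [pvGetD_append_lt t c j h]; exact hbest j h
        · have : j = t.length := by omega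
          subst this; rw [pvGetD_append_len]; exact hc
      | some b =>
        obtain ⟨hb, hsep, hmin⟩ := hbest
        refine ⟨by omega, by rw [pvGetD_append_lt t c b hb]; exact hsep, ?_⟩
        intro j hj hsep'
        rw [hlen] at hj
        rcases Nat.lt_or_ge j t.length with h | h
        · rw [pvGetD_append_lt t c j h] at hsep'
          exact hmin j h hsep'
        · have : j = t.length := by omega
          subst this
          rw [pvGetD_append_len] at hsep'
          rw [hsep'] at hc
          exact absurd hc (by decide)

theorem leftScan_spec (head : List Char) (i : Nat) :
    match pvLeftScan head i with
    | none => ∀ j, j < i → pvSepsA.contains (head.getD j ' ') = false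
    | some l => l < i ∧ pvSepsA.contains (head.getD l ' ') = true ∧
        ∀ j, l < j → j < i → pvSepsA.contains (head.getD j ' ') = false := by
  induction i with
  | zero => intro j hj; omega
  | succ i ih =>
    unfold pvLeftScan
    rw [sepB_eq_sepA]
    by_cases hc : pvSepsA.contains (head.getD i ' ') = true
    · rw [if_pos hc]
      exact ⟨by omega, hc, by intro j hj hji; omega⟩
    · simp only [Bool.not_eq_true] at hc
      rw [if_neg (by rw [hc]; simp)]
      cases hsc : pvLeftScan head i with
      | none =>
        rw [hsc] at ih
        intro j hj
        rcases Nat.lt_or_ge j i with h | h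
        · exact ih j h
        · have : j = i := by omega
          subst this; exact hc
      | some l =>
        rw [hsc] at ih
        obtain ⟨hl, hsep, hnone⟩ := ih
        refine ⟨by omega, hsep, ?_⟩
        intro j hj hji
        rcases Nat.lt_or_ge j i with h | h
        · exact hnone j hj h
        · have : j = i := by omega
          subst this; exact hc

theorem rightScan_spec (tail : List Char) :
    match pvRightScan tail with
    | none => ∀ j, j < tail.length → pvSepsA.contains (tail.getD j ' ') = false
    | some r => r < tail.length ∧ pvSepsA.contains (tail.getD r ' ') = true ∧
        ∀ j, j < r → pvSepsA.contains (tail.getD j ' ') = false := by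
  induction tail with
  | nil => intro j hj; simp at hj
  | cons c rest ih =>
    unfold pvRightScan
    rw [sepB_eq_sepA]
    by_cases hc : pvSepsA.contains c = true
    · rw [if_pos hc]
      refine ⟨by simp, by rw [List.getD_cons_zero]; exact hc, ?_⟩
      intro j hj; omega
    · simp only [Bool.not_eq_true] at hc
      rw [if_neg (by rw [hc]; simp)]
      cases hsc : pvRightScan rest with
      | none =>
        rw [hsc] at ih
        simp only [Option.map_none]
        intro j hj
        cases j with
        | zero => rw [List.getD_cons_zero]; exact hc
        | succ j =>
          rw [List.getD_cons_succ]
          exact ih j (by simpa using hj)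
      | some r =>
        rw [hsc] at ih
        obtain ⟨hr, hsep, hnone⟩ := ih
        simp only [Option.map_some]
        refine ⟨by simpa using Nat.succ_lt_succ hr, by rw [List.getD_cons_succ]; exact hsep, ?_⟩
        intro j hj
        cases j with
        | zero => rw [List.getD_cons_zero]; exact hc
        | succ j =>
          rw [List.getD_cons_succ]
          exact hnone j (by omega)

theorem bestB_isBest (s : List Char) (m : Nat) : IsBest s m (pvBestB s m) := by
  simp only [pvBestB]
  have hlen : (s.take (m + 1)).length = min (m + 1) s.length := by simp
  have hL := leftScan_spec (s.take (m + 1)) (s.take (m + 1)).length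
  have hR := rightScan_spec (s.drop (m + 1))
  have hlenR : (s.drop (m + 1)).length = s.length - (m + 1) := by simp
  cases hsl : pvLeftScan (s.take (m + 1)) (s.take (m + 1)).length with
  | none =>
    rw [hsl] at hL
    have hLs : ∀ j, j < s.length → j ≤ m → pvSepsA.contains (s.getD j ' ') = false := by
      intro j hjn hjm
      have := hL j (by omega)
      rwa [pvGetD_take s (m + 1) j (by omega)] at this
    cases hsr : pvRightScan (s.drop (m + 1)) with
    | none =>
      rw [hsr] at hR
      simp only [Option.map_none]
      intro j hj
      rcases Nat.lt_or_ge j (m + 1) with h | h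
      · exact hLs j hj (by omega)
      · have := hR (j - (m + 1)) (by omega)
        rwa [pvGetD_drop, (by omega : m + 1 + (j - (m + 1)) = j)] at this
    | some r =>
      rw [hsr] at hR
      obtain ⟨hr, hsepr, hnoner⟩ := hR
      rw [hlenR] at hr
      simp only [Option.map_some]
      refine ⟨by omega, by rwa [pvGetD_drop] at hsepr, ?_⟩
      intro j hj hsepj
      rcases Nat.lt_or_ge j (m + 1) with h | h
      · have hcontr := hLs j hj (by omega)
        rw [hsepj] at hcontr
        exact absurd hcontr (by decide)
      · by_cases hjr : j < m + 1 + r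
        · have := hnoner (j - (m + 1)) (by omega)
          rw [pvGetD_drop, (by omega : m + 1 + (j - (m + 1)) = j)] at this
          rw [hsepj] at this
          exact absurd this (by decide)
        · omega
  | some l =>
    rw [hsl] at hL
    obtain ⟨hl, hsepl, hnonel⟩ := hL
    rw [hlen] at hl
    have hlm : l ≤ m := by omega
    have hln : l < s.length := by omega
    have hsepl' : pvSepsA.contains (s.getD l ' ') = true := by
      rwa [pvGetD_take s (m + 1) l (by omega)] at hsepl
    have hnoneL : ∀ j, j < s.length → j ≤ m → pvSepsA.contains (s.getD j ' ') = true → j ≤ l := by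
      intro j hjn hjm hsepj
      by_contra hlj
      have := hnonel j (by omega) (by rw [hlen]; omega)
      rw [pvGetD_take s (m + 1) j (by omega), hsepj] at this
      exact absurd this (by decide)
    cases hsr : pvRightScan (s.drop (m + 1)) with
    | none =>
      rw [hsr] at hR
      simp only [Option.map_none]
      refine ⟨hln, hsepl', ?_⟩
      intro j hj hsepj
      rcases Nat.lt_or_ge j (m + 1) with h | h
      · have := hnoneL j hj (by omega) hsepj
        omega
      · have := hR (j - (m + 1)) (by omega)
        rw [pvGetD_drop, (by omega : m + 1 + (j - (m + 1)) = j), hsepj] at this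
        exact absurd this (by decide)
    | some r =>
      rw [hsr] at hR
      obtain ⟨hr, hsepr, hnoner⟩ := hR
      rw [hlenR] at hr
      have hsepr' : pvSepsA.contains (s.getD (m + 1 + r) ' ') = true := by
        rwa [pvGetD_drop] at hsepr
      have hnoneR : ∀ j, m < j → j < m + 1 + r → pvSepsA.contains (s.getD j ' ') = true → False := by
        intro j hmj hjr hsepj
        have := hnoner (j - (m + 1)) (by omega)
        rw [pvGetD_drop, (by omega : m + 1 + (j - (m + 1)) = j), hsepj] at this
        exact absurd this (by decide)
      simp only [Option.map_some]
      by_cases hcmp : m - l ≤ m + 1 + r - m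
      · simp only [hcmp, if_true]
        refine ⟨hln, hsepl', ?_⟩
        intro j hj hsepj
        rcases Nat.lt_or_ge j (m + 1) with h | h
        · have hjl := hnoneL j hj (by omega) hsepj
          rcases Nat.lt_or_ge j l with h2 | h2
          · omega
          · have : j = l := by omega
            subst this; omega
        · have : m + 1 + r ≤ j := by
            by_contra hlt
            exact hnoneR j h (by omega) hsepj
          omega
      · simp only [hcmp, if_false]
        refine ⟨by omega, hsepr', ?_⟩
        intro j hj hsepj
        rcases Nat.lt_or_ge j (m + 1) with h | h
        · have hjl := hnoneL j hj (by omega) hsepj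
          omega
        · have hge : m + 1 + r ≤ j := by
            by_contra hlt
            exact hnoneR j h (by omega) hsepj
          rcases Nat.lt_or_ge (m + 1 + r) j with h2 | h2
          · omega
          · have : j = m + 1 + r := by omega
            subst this; omega

theorem bestA_eq_bestB (s : List Char) :
    pvBestA s ((s.length / 2 : Nat) : Int) =
      Option.map (fun bn : Nat => (bn : Int)) (pvBestB s (s.length / 2)) := by
  obtain ⟨r, hr, hbest⟩ := bestA_isBest s (s.length / 2)
  rw [hr, isBest_unique s (s.length / 2) r (pvBestB s (s.length / 2)) hbest (bestB_isBest s (s.length / 2))]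

theorem wrap_eq (smiles : String) (max_len : Int) :
    wrap_smiles_two_lines smiles max_len = wrap_smiles_two_lines_alt smiles max_len := by
  simp only [wrap_smiles_two_lines, wrap_smiles_two_lines_alt]
  by_cases hshort : PySem.Str.len smiles ≤ max_len
  · rw [if_pos hshort, if_pos hshort]
  · rw [if_neg hshort, if_neg hshort]
    have hlenS : PySem.Str.len smiles = (smiles.toList.length : Int) := by
      simp [PySem.Str.len_eq]
    have hmid : PySem.Int.floordiv (PySem.Str.len smiles) 2 =
        ((smiles.toList.length / 2 : Nat) : Int) := by
      rw [hlenS]; exact_mod_cast PySem.Int.floordiv_natCast smiles.toList.length 2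
    rw [hmid, bestA_eq_bestB smiles.toList]
    have hB := bestB_isBest smiles.toList (smiles.toList.length / 2)
    cases hb : pvBestB smiles.toList (smiles.toList.length / 2) with
    | none =>
      simp only [Option.map_none]
      rw [PySem.List.slice_to_natCast, PySem.List.slice_from_natCast]
    | some bn =>
      rw [hb] at hB
      obtain ⟨hbn, -, -⟩ := hB
      simp only [Option.map_some]
      have hcast : ((bn : Int) + 1) = ((bn + 1 : Nat) : Int) := by push_cast; ring
      by_cases hcond : 0 < bn ∧ bn < smiles.toList.length - 1
      · rw [if_pos (by rw [hlenS]; omega : 0 < (bn : Int) ∧ (bn : Int) < PySem.Str.len smiles - 1),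
          if_pos hcond, hcast, PySem.List.slice_to_natCast, PySem.List.slice_from_natCast]
      · rw [if_neg (by rw [hlenS]; omega : ¬(0 < (bn : Int) ∧ (bn : Int) < PySem.Str.len smiles - 1)),
          if_neg hcond, PySem.List.slice_to_natCast, PySem.List.slice_from_natCast]

-- ===== VERDICT (by name: the statement is the Claim_ definition above) =====
theorem wrap_smiles_two_lines_spec : Claim_equal_wrap_smiles_two_lines := by
  intro smiles max_len _hdom
  exact wrap_eq smiles max_len
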